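-- pv_equiv track=rewrite | github.com/lhlssmile/yuki_cf | me_daily/2025/11/09/cfrank475/c.py | solve_dfs
-- ===== SOURCE A (Python) =====
-- from typing import List
-- from functools import lru_cache
--
-- def solve_dfs(grid: List[List[int]], k: int) -> int:
--     m = len(grid)
--     n = len(grid[0]) if m > 0 else 0
--
--
--     # 预处理：add_cost 与 最小剩余成本 minCost，用于剪枝
--     add = [[1 if grid[r][c] > 0 else 0 for c in range(n)] for r in range(m)]
--     INF = 10**9
--     minCost = [[INF] * n for _ in range(m)]
--     for r in range(m - 1, -1, -1):
--         for c in range(n - 1, -1, -1):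
--             if r == m - 1 and c == n - 1:
--                 minCost[r][c] = add[r][c]
--             else:
--                 down = minCost[r + 1][c] if r + 1 < m else INF
--                 right = minCost[r][c + 1] if c + 1 < n else INF
--                 minCost[r][c] = add[r][c] + min(down, right)
--
--     NEG = -10**18
--
--     @lru_cache(maxsize=None)
--     def dfs(r: int, c: int, used: int) -> int:
--         # 剪枝：即使走最省成本的路径也超预算，直接不可达
--         if used + minCost[r][c] > k:
--             return NEG
--
--         new_used = used + add[r][c]
--         if new_used > k:
--             return NEG
--
--         val = grid[r][c]
--         if r == m - 1 and c == n - 1: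
--             return val
--
--         best_next = NEG
--         if r + 1 < m:
--             best_next = max(best_next, dfs(r + 1, c, new_used))
--         if c + 1 < n:
--             best_next = max(best_next, dfs(r, c + 1, new_used))
--
--         return NEG if best_next == NEG else val + best_next
--
--     ans = dfs(0, 0, 0)
--     return -1 if ans == NEG else ans
-- ===== SOURCE B (Python) =====
-- from typing import List
--
-- def solve_dfs(grid: List[List[int]], k: int) -> int:
--     m = len(grid)
--     n = len(grid[0]) if m > 0 else 0
--     NEG = -10 ** 18
--     cap = min(k, m + n - 1)
--     if cap < 0:
--         return -1
--     # bottom-up DP, rows from the bottom: cell (r, c) holds, for each remaining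
--     # budget b in 0..cap, the best path sum from (r, c) to the goal using at
--     # most b positive cells (NEG if unreachable).
--     below = []
--     for r in range(m - 1, -1, -1):
--         row = []
--         for c in range(n - 1, -1, -1):
--             a = 1 if grid[r][c] > 0 else 0
--             cell = []
--             for b in range(cap + 1):
--                 if b < a:
--                     cell.append(NEG)
--                 elif r == m - 1 and c == n - 1:
--                     cell.append(grid[r][c])
--                 else:
--                     best = NEG
--                     if r + 1 < m:
--                         best = max(best, below[c][b - a])
--                     if c + 1 < n:
--                         best = max(best, row[0][b - a])
--                     cell.append(NEG if best == NEG else grid[r][c] + best)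
--             row.insert(0, cell)
--         below = row
--     res = below[0][cap]
--     return -1 if res == NEG else res
-- ===== Notes on version B (the rewrite author's own statement) =====
-- stated objective: alternative
-- what changed: Replaced the lru_cache top-down recursion with its minCost pruning by an iterative bottom-up DP table indexed by remaining positive-cell budget (capped at the path length m+n-1), filled row by row from the bottom-right.
import Mathlib
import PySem

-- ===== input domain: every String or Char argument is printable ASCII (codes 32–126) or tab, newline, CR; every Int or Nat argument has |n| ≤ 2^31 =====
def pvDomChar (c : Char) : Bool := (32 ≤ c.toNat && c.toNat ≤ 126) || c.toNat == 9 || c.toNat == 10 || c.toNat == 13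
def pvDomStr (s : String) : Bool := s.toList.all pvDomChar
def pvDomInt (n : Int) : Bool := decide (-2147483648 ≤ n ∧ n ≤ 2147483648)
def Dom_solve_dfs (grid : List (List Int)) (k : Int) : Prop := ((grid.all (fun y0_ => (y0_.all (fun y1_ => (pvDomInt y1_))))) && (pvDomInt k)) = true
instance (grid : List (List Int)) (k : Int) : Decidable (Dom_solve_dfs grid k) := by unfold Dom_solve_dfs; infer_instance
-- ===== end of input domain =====

-- B replaces A's pruned, memoized top-down recursion by an explicit bottom-up DP table
-- indexed by remaining budget (capped at the path length), with no minCost pruning: objective 'alternative'.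

-- ===== PORT A =====
-- All list indexing in the ports uses getD with in-range indices guaranteed by Pre_ (exact there).
def pvA_INF : Int := 10 ^ 9
def pvA_NEG : Int := -(10 ^ 18)

-- add = [[1 if grid[r][c] > 0 else 0 ...]]
def pvA_add (grid : List (List Int)) (m n : Nat) : List (List Int) :=
  (List.range m).map (fun r => (List.range n).map (fun c =>
    if ((grid.getD r []).getD c 0) > 0 then (1 : Int) else 0))

-- inner loop `for c in range(n-1,-1,-1)` of the minCost fill, building one row from the right;
-- cnt = number of rightmost columns already built
def pvA_mcRow (grid : List (List Int)) (m n r : Nat) (down : List Int) : Nat → List Int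
  | 0 => []
  | cnt+1 =>
    let rest := pvA_mcRow grid m n r down cnt
    let c := n - cnt - 1
    let a := ((pvA_add grid m n).getD r []).getD c 0
    let v := if r = m - 1 ∧ c = n - 1 then a
      else
        let dn := if r + 1 < m then down.getD c pvA_INF else pvA_INF
        let rt := if c + 1 < n then rest.getD 0 pvA_INF else pvA_INF
        a + min dn rt
    v :: rest

-- outer loop `for r in range(m-1,-1,-1)`: rows built bottom-up, t rows done so far
def pvA_mcRows (grid : List (List Int)) (m n : Nat) : Nat → List (List Int)
  | 0 => []
  | t+1 =>
    let rest := pvA_mcRows grid m n t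
    pvA_mcRow grid m n (m - t - 1) (rest.headD (List.replicate n pvA_INF)) n :: rest

def pvA_minCost (grid : List (List Int)) (m n : Nat) : List (List Int) :=
  pvA_mcRows grid m n m

-- the recursive dfs (the lru_cache only memoizes; the computed function is this recursion)
def pvA_dfs (grid : List (List Int)) (m n : Nat) (k : Int) (r c : Nat) (used : Int) : Int :=
  if used + ((pvA_minCost grid m n).getD r []).getD c pvA_INF > k then pvA_NEG
  else
    let new_used := used + ((pvA_add grid m n).getD r []).getD c 0
    if new_used > k then pvA_NEG
    else
      let val := (grid.getD r []).getD c 0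
      if r = m - 1 ∧ c = n - 1 then val
      else
        let best1 := if r + 1 < m then max pvA_NEG (pvA_dfs grid m n k (r+1) c new_used) else pvA_NEG
        let best2 := if c + 1 < n then max best1 (pvA_dfs grid m n k r (c+1) new_used) else best1
        if best2 = pvA_NEG then pvA_NEG else val + best2
  termination_by (m - r) + (n - c)
  decreasing_by all_goals omega

def solve_dfs (grid : List (List Int)) (k : Int) : Int :=
  let m := grid.length
  let n := if 0 < m then (grid.headD []).length else 0
  let ans := pvA_dfs grid m n k 0 0 0
  if ans = pvA_NEG then -1 else ans

-- ===== PORT B =====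
def pvB_NEG : Int := -(10 ^ 18)

-- one DP cell: list over budgets b = 0..capN
def pvB_cell (grid : List (List Int)) (m n capN r c : Nat)
    (below row : List (List Int)) : List Int :=
  (List.range (capN + 1)).map (fun b =>
    let a : Nat := if ((grid.getD r []).getD c 0) > 0 then 1 else 0
    if b < a then pvB_NEG
    else if r = m - 1 ∧ c = n - 1 then (grid.getD r []).getD c 0
    else
      let best := pvB_NEG
      let best := if r + 1 < m then max best ((below.getD c []).getD (b - a) 0) else best
      let best := if c + 1 < n then max best ((row.headD []).getD (b - a) 0) else best
      if best = pvB_NEG then pvB_NEG else (grid.getD r []).getD c 0 + best)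

-- inner loop `for c in range(n-1,-1,-1)` with row.insert(0, cell): build the row from the right
def pvB_row (grid : List (List Int)) (m n capN r : Nat) (below : List (List Int)) :
    Nat → List (List Int)
  | 0 => []
  | cnt+1 =>
    let rest := pvB_row grid m n capN r below cnt
    pvB_cell grid m n capN r (n - cnt - 1) below rest :: rest

-- outer loop `for r in range(m-1,-1,-1)`: below after t rows processed
def pvB_rows (grid : List (List Int)) (m n capN : Nat) : Nat → List (List Int)
  | 0 => []
  | t+1 => pvB_row grid m n capN (m - t - 1) (pvB_rows grid m n capN t) n

def solve_dfs_alt (grid : List (List Int)) (k : Int) : Int :=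
  let m := grid.length
  let n := if 0 < m then (grid.headD []).length else 0
  let cap : Int := min k ((m : Int) + (n : Int) - 1)
  if cap < 0 then -1
  else
    let below := pvB_rows grid m n cap.toNat m
    let res := (below.getD 0 []).getD cap.toNat 0
    if res = pvB_NEG then -1 else res

-- ===== PRECONDITION & SPEC =====
-- Pre_ excludes exactly the inputs where Python A raises IndexError: an empty grid, a grid
-- whose first row is empty (n = 0), or a later row shorter than the first (the add/minCost
-- comprehensions index grid[r][c] for c < n).
def Pre_solve_dfs (grid : List (List Int)) (k : Int) : Prop :=
  grid ≠ [] ∧ 0 < (grid.headD []).length ∧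
    ∀ row ∈ grid, (grid.headD []).length ≤ row.length

instance (grid : List (List Int)) (k : Int) : Decidable (Pre_solve_dfs grid k) := by
  unfold Pre_solve_dfs; infer_instance

def pvWitness_solve_dfs : List (List Int) × Int := ([[1, -2], [3, 4]], 1)

def Spec_solve_dfs (grid : List (List Int)) (k : Int) (out : Int) : Prop := out = solve_dfs_alt grid k
instance (grid : List (List Int)) (k : Int) (out : Int) : Decidable (Spec_solve_dfs grid k out) := by unfold Spec_solve_dfs; infer_instance

-- ===== CLAIM (what is proved, stated in full; the proofs are below) =====
def Claim_equal_solve_dfs : Prop := ∀ (grid : List (List Int)) (k : Int), Dom_solve_dfs grid k → Pre_solve_dfs grid k → Spec_solve_dfs grid k (solve_dfs grid k)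

-- ===== LEMMAS AND PROOFS =====

-- reference functions (proof-side only)
def pvG (grid : List (List Int)) (r c : Nat) : Int := (grid.getD r []).getD c 0
def pvAd (grid : List (List Int)) (r c : Nat) : Int := if pvG grid r c > 0 then 1 else 0

-- minimal number of positive cells on a monotone path from (r,c) to (m-1,n-1)
def pvMc (grid : List (List Int)) (m n r c : Nat) : Int :=
  if r = m - 1 ∧ c = n - 1 then pvAd grid r c
  else
    pvAd grid r c +
      min (if r + 1 < m then pvMc grid m n (r+1) c else pvA_INF)
          (if c + 1 < n then pvMc grid m n r (c+1) else pvA_INF)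
  termination_by (m - r) + (n - c)
  decreasing_by all_goals omega

-- best path sum from (r,c) with remaining budget b (pvA_NEG if infeasible)
def pvD (grid : List (List Int)) (m n r c : Nat) (b : Int) : Int :=
  if b < pvAd grid r c then pvA_NEG
  else if r = m - 1 ∧ c = n - 1 then pvG grid r c
  else
    let b1 := if r + 1 < m then max pvA_NEG (pvD grid m n (r+1) c (b - pvAd grid r c)) else pvA_NEG
    let b2 := if c + 1 < n then max b1 (pvD grid m n r (c+1) (b - pvAd grid r c)) else b1
    if b2 = pvA_NEG then pvA_NEG else pvG grid r c + b2
  termination_by (m - r) + (n - c)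
  decreasing_by all_goals omega

theorem pv_getD_map_range {α : Type} (f : Nat → α) (mm i : Nat) (d : α) (h : i < mm) :
    (((List.range mm).map f).getD i d) = f i := by
  simp [List.getD_eq_getElem?_getD, List.getElem?_map, List.getElem?_range h]

theorem pv_add_lookup (grid : List (List Int)) (m n r c : Nat) (hr : r < m) (hc : c < n) :
    ((pvA_add grid m n).getD r []).getD c 0 = pvAd grid r c := by
  rw [pvA_add, pv_getD_map_range _ _ _ _ hr, pv_getD_map_range _ _ _ _ hc]
  rfl

theorem pv_mcRow_eq (grid : List (List Int)) (m n r : Nat) (down : List Int)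
    (hr : r < m)
    (hdown : r + 1 < m → ∀ c < n, down.getD c pvA_INF = pvMc grid m n (r+1) c) :
    ∀ cnt, cnt ≤ n →
      pvA_mcRow grid m n r down cnt =
        (List.range cnt).map (fun i => pvMc grid m n r (n - cnt + i)) := by
  intro cnt
  induction cnt with
  | zero => intro _; simp [pvA_mcRow]
  | succ cnt ih =>
    intro hcnt
    have hrest := ih (by omega)
    have hc : n - cnt - 1 < n := by omega
    rw [pvA_mcRow, hrest, List.range_succ_eq_map]
    simp only [List.map_cons, List.map_map]
    congr 1
    · -- head entry = pvMc r (n-(cnt+1)+0)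
      rw [pv_add_lookup grid m n r (n - cnt - 1) hr hc]
      have hcol : n - (cnt + 1) + 0 = n - cnt - 1 := by omega
      rw [hcol, pvMc]
      by_cases hlast : r = m - 1 ∧ n - cnt - 1 = n - 1
      · simp [hlast]
      · simp only [hlast, if_false]
        congr 1
        congr 1
        · by_cases hd : r + 1 < m
          · simp only [hd, if_true]
            exact hdown hd _ hc
          · simp only [hd, if_false]
        · by_cases hrt : n - cnt - 1 + 1 < n
          · have hcntpos : 0 < cnt := by omega
            simp only [hrt, if_true]
            rw [pv_getD_map_range _ _ _ _ hcntpos]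
            congr 1
            omega
          · have hcnt0 : cnt = 0 := by omega
            subst hcnt0
            simp only [if_neg hrt]
    · apply List.map_congr_left
      intro i hi
      simp only [Function.comp]
      congr 1
      simp only [List.mem_range] at hi
      omega

theorem pv_mcRows_eq (grid : List (List Int)) (m n : Nat) :
    ∀ t, t ≤ m →
      pvA_mcRows grid m n t =
        (List.range t).map (fun j => (List.range n).map (fun c => pvMc grid m n (m - t + j) c)) := by
  intro t
  induction t with
  | zero => intro _; simp [pvA_mcRows]
  | succ t ih =>
    intro ht
    have hrest := ih (by omega)
    rw [pvA_mcRows, hrest, List.range_succ_eq_map]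
    simp only [List.map_cons, List.map_map]
    congr 1
    · have hr : m - t - 1 < m := by omega
      rw [pv_mcRow_eq grid m n (m - t - 1) _ hr ?_ n le_rfl]
      · apply List.map_congr_left
        intro i _
        congr 1
        omega
      · intro hup c hcn
        have htpos : 0 < t := by omega
        cases t with
        | zero => omega
        | succ t' =>
          rw [List.range_succ_eq_map]
          simp only [List.map_cons, List.headD_cons]
          rw [pv_getD_map_range _ _ _ _ hcn]
          congr 1
          omega
    · apply List.map_congr_left
      intro i hi
      simp only [Function.comp]
      apply List.map_congr_left
      intro c _
      congr 1
      simp only [List.mem_range] at hi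
      omega

theorem pv_mc_lookup (grid : List (List Int)) (m n r c : Nat) (hr : r < m) (hc : c < n) :
    ((pvA_minCost grid m n).getD r []).getD c pvA_INF = pvMc grid m n r c := by
  rw [pvA_minCost, pv_mcRows_eq grid m n m le_rfl, pv_getD_map_range _ _ _ _ hr,
    pv_getD_map_range _ _ _ _ hc]
  congr 2
  omega

-- infeasibility: below the minimal cost the budgeted best is NEG
theorem pv_D_neg_of_lt_mc (grid : List (List Int)) (m n : Nat) :
    ∀ fuel r c b, (m - r) + (n - c) ≤ fuel → r < m → c < n →
      b < pvMc grid m n r c → pvD grid m n r c b = pvA_NEG := by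
  intro fuel
  induction fuel with
  | zero => intro r c b hf hr hc _; exfalso; omega
  | succ fuel ih =>
    intro r c b hf hr hc hb
    rw [pvD]
    by_cases hba : b < pvAd grid r c
    · simp [hba]
    · simp only [hba, if_false]
      rw [pvMc] at hb
      by_cases hlast : r = m - 1 ∧ c = n - 1
      · rw [if_pos hlast] at hb
        exact absurd hb hba
      · rw [if_neg hlast] at hb
        rw [if_neg hlast]
        have hdn : (if r + 1 < m then max pvA_NEG (pvD grid m n (r+1) c (b - pvAd grid r c)) else pvA_NEG) = pvA_NEG := by
          by_cases hd : r + 1 < m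
          · have hh : pvD grid m n (r+1) c (b - pvAd grid r c) = pvA_NEG := by
              apply ih _ _ _ (by omega) hd hc
              rw [if_pos hd] at hb
              have h1 := min_le_left (pvMc grid m n (r+1) c)
                (if c + 1 < n then pvMc grid m n r (c+1) else pvA_INF)
              omega
            rw [if_pos hd, hh, max_self]
          · rw [if_neg hd]
        have hrt : (if c + 1 < n then max pvA_NEG (pvD grid m n r (c+1) (b - pvAd grid r c)) else pvA_NEG) = pvA_NEG := by
          by_cases hd : c + 1 < n
          · have hh : pvD grid m n r (c+1) (b - pvAd grid r c) = pvA_NEG := by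
              apply ih _ _ _ (by omega) hr hd
              rw [if_pos hd] at hb
              have h1 := min_le_right (if r + 1 < m then pvMc grid m n (r+1) c else pvA_INF)
                (pvMc grid m n r (c+1))
              omega
            rw [if_pos hd, hh, max_self]
          · rw [if_neg hd]
        rw [hdn, hrt]
        simp

-- A's dfs computes pvD of the remaining budget
theorem pv_dfs_eq_D (grid : List (List Int)) (m n : Nat) (k : Int) :
    ∀ fuel r c used, (m - r) + (n - c) ≤ fuel → r < m → c < n →
      pvA_dfs grid m n k r c used = pvD grid m n r c (k - used) := by
  intro fuel
  induction fuel with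
  | zero => intro r c used hf hr hc; exfalso; omega
  | succ fuel ih =>
    intro r c used hf hr hc
    rw [pvA_dfs]
    rw [pv_mc_lookup grid m n r c hr hc, pv_add_lookup grid m n r c hr hc]
    simp only [show ((grid.getD r []).getD c 0 : Int) = pvG grid r c from rfl]
    by_cases hprune : used + pvMc grid m n r c > k
    · rw [if_pos hprune]
      rw [pv_D_neg_of_lt_mc grid m n ((m - r) + (n - c)) r c (k - used) le_rfl hr hc (by omega)]
    · rw [if_neg hprune]
      by_cases hgt : used + pvAd grid r c > k
      · rw [if_pos hgt, pvD, if_pos (by omega)]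
      · rw [if_neg hgt]
        conv_rhs => rw [pvD, if_neg (by omega : ¬ (k - used < pvAd grid r c))]
        simp only []
        by_cases hlast : r = m - 1 ∧ c = n - 1
        · rw [if_pos hlast, if_pos hlast]
        · rw [if_neg hlast, if_neg hlast]
          have e1 : (if r + 1 < m then max pvA_NEG (pvA_dfs grid m n k (r+1) c (used + pvAd grid r c)) else pvA_NEG)
              = (if r + 1 < m then max pvA_NEG (pvD grid m n (r+1) c (k - used - pvAd grid r c)) else pvA_NEG) := by
            by_cases hd : r + 1 < m
            · rw [if_pos hd, if_pos hd, ih (r+1) c (used + pvAd grid r c) (by omega) hd hc]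
              ring_nf
            · rw [if_neg hd, if_neg hd]
          rw [e1]
          by_cases hd : c + 1 < n
          · rw [if_pos hd, if_pos hd, ih r (c+1) (used + pvAd grid r c) (by omega) hr hd]
            ring_nf
          · rw [if_neg hd, if_neg hd]

-- B's cell entries compute pvD, given correct neighbour tables
theorem pv_cell_eq (grid : List (List Int)) (m n capN r c : Nat) (hr : r < m) (hc : c < n)
    (below row : List (List Int))
    (hbelow : r + 1 < m → ∀ c' < n, ∀ b' ≤ capN, ((below.getD c' []).getD b' 0 = pvD grid m n (r+1) c' (b' : Int)))
    (hright : c + 1 < n → ∀ b' ≤ capN, ((row.headD []).getD b' 0 = pvD grid m n r (c+1) (b' : Int))) :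
    ∀ b ≤ capN, (pvB_cell grid m n capN r c below row).getD b 0 = pvD grid m n r c (b : Int) := by
  intro b hb
  rw [pvB_cell, pv_getD_map_range _ _ _ _ (by omega : b < capN + 1)]
  simp only [show ((grid.getD r []).getD c 0 : Int) = pvG grid r c from rfl,
    show pvB_NEG = pvA_NEG from rfl]
  conv_rhs => rw [pvD]
  have key : ∃ aN : Nat, aN ≤ 1 ∧ (if pvG grid r c > 0 then (1:Nat) else 0) = aN ∧ pvAd grid r c = (aN : Int) := by
    by_cases h : pvG grid r c > 0
    · exact ⟨1, by omega, by rw [if_pos h], by simp [pvAd, h]⟩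
    · exact ⟨0, by omega, by rw [if_neg h], by simp [pvAd, h]⟩
  obtain ⟨aN, ha1, haN, haI⟩ := key
  rw [haN, haI]
  by_cases h1 : b < aN
  · rw [if_pos h1, if_pos (by exact_mod_cast h1)]
  · rw [if_neg h1, if_neg (show ¬((b:Int) < (aN:Int)) from by exact_mod_cast h1)]
    have hcast : ((b - aN : Nat) : Int) = (b : Int) - (aN : Int) :=
      Nat.cast_sub (Nat.le_of_not_lt h1)
    by_cases hlast : r = m - 1 ∧ c = n - 1
    · rw [if_pos hlast, if_pos hlast]
    · rw [if_neg hlast, if_neg hlast]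
      have e1 : (if r + 1 < m then max pvA_NEG ((below.getD c []).getD (b - aN) 0) else pvA_NEG)
          = (if r + 1 < m then max pvA_NEG (pvD grid m n (r+1) c ((b:Int) - (aN:Int))) else pvA_NEG) := by
        by_cases hd : r + 1 < m
        · rw [if_pos hd, if_pos hd, hbelow hd c hc _ (by omega), hcast]
        · rw [if_neg hd, if_neg hd]
      rw [e1]
      by_cases hd : c + 1 < n
      · rw [if_pos hd, hright hd _ (by omega), hcast]
        simp only [if_pos hd]
      · rw [if_neg hd]
        simp only [if_neg hd]

-- B's row builder: entry j is the pvD column of c = n - cnt + j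
theorem pv_row_eq (grid : List (List Int)) (m n capN r : Nat) (hr : r < m)
    (below : List (List Int))
    (hbelow : r + 1 < m → ∀ c' < n, ∀ b' ≤ capN, ((below.getD c' []).getD b' 0 = pvD grid m n (r+1) c' (b' : Int))) :
    ∀ cnt, cnt ≤ n → ∀ j < cnt, ∀ b ≤ capN,
      ((pvB_row grid m n capN r below cnt).getD j []).getD b 0 = pvD grid m n r (n - cnt + j) (b : Int) := by
  intro cnt
  induction cnt with
  | zero => intro _ j hj; exact absurd hj (by omega)
  | succ cnt ih =>
    intro hcnt j hj b hb
    rw [pvB_row]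
    cases j with
    | zero =>
      rw [List.getD_cons_zero]
      have hc : n - (cnt + 1) + 0 < n := by omega
      rw [pv_cell_eq grid m n capN r (n - cnt - 1) hr (by omega) below _ hbelow ?_ b hb]
      · rw [show n - (cnt + 1) + 0 = n - cnt - 1 from by omega]
      · intro hcn b' hb'
        cases cnt with
        | zero => exact absurd hcn (by omega)
        | succ cnt' =>
          have hh := ih (by omega) 0 (by omega) b' hb'
          have hhead : (pvB_row grid m n capN r below (cnt'+1)).headD [] =
              (pvB_row grid m n capN r below (cnt'+1)).getD 0 [] := by
            rw [pvB_row]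
            rfl
          rw [hhead, hh]
          rw [show n - (cnt' + 1) - 1 + 1 = n - (cnt' + 1) + 0 from by omega]
    | succ j =>
      rw [List.getD_cons_succ]
      rw [ih (by omega) j (by omega) b hb]
      rw [show n - (cnt + 1) + (j + 1) = n - cnt + j from by omega]

-- B's outer loop: after t rows, `below` is the pvD row for r = m - t
theorem pv_rows_eq (grid : List (List Int)) (m n capN : Nat) :
    ∀ t, 1 ≤ t → t ≤ m → ∀ c, c < n → ∀ b, b ≤ capN →
      ((pvB_rows grid m n capN t).getD c []).getD b 0 = pvD grid m n (m - t) c (b : Int) := by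
  intro t
  induction t with
  | zero => intro h1; exact absurd h1 (by omega)
  | succ t ih =>
    intro _ ht c hc b hb
    rw [pvB_rows]
    have hr : m - t - 1 < m := by omega
    rw [pv_row_eq grid m n capN (m - t - 1) hr (pvB_rows grid m n capN t) ?_ n le_rfl c
        (by omega) b hb]
    · rw [show n - n + c = c from by omega, show m - (t + 1) = m - t - 1 from by omega]
    · intro hup c' hc' b' hb'
      have hup' : 1 ≤ t := by omega
      rw [ih hup' (by omega) c' hc' b' hb']
      rw [show m - t - 1 + 1 = m - t from by omega]

-- saturation: beyond the number of remaining cells the budget no longer matters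
theorem pv_D_sat (grid : List (List Int)) (m n : Nat) :
    ∀ fuel r c, (m - r) + (n - c) ≤ fuel → r < m → c < n →
      ∀ b b' : Int, (((m - r) + (n - c) - 1 : Nat) : Int) ≤ b → (((m - r) + (n - c) - 1 : Nat) : Int) ≤ b' →
        pvD grid m n r c b = pvD grid m n r c b' := by
  intro fuel
  induction fuel with
  | zero => intro r c hf hr hc; exfalso; omega
  | succ fuel ih =>
    intro r c hf hr hc b b' hbb hbb'
    have key : ∃ aN : Nat, aN ≤ 1 ∧ pvAd grid r c = (aN : Int) := by
      by_cases h : pvG grid r c > 0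
      · exact ⟨1, by omega, by rw [pvAd, if_pos h]; rfl⟩
      · exact ⟨0, by omega, by rw [pvAd, if_neg h]; rfl⟩
    obtain ⟨aN, ha1, haI⟩ := key
    rw [pvD]
    conv_rhs => rw [pvD]
    rw [haI]
    rw [if_neg (show ¬(b < (aN:Int)) from by omega), if_neg (show ¬(b' < (aN:Int)) from by omega)]
    by_cases hlast : r = m - 1 ∧ c = n - 1
    · rw [if_pos hlast, if_pos hlast]
    · rw [if_neg hlast, if_neg hlast]
      have e1 : (if r + 1 < m then max pvA_NEG (pvD grid m n (r+1) c (b - (aN:Int))) else pvA_NEG)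
          = (if r + 1 < m then max pvA_NEG (pvD grid m n (r+1) c (b' - (aN:Int))) else pvA_NEG) := by
        by_cases hd : r + 1 < m
        · rw [if_pos hd, if_pos hd,
            ih (r+1) c (by omega) hd hc (b - (aN:Int)) (b' - (aN:Int)) (by omega) (by omega)]
        · rw [if_neg hd, if_neg hd]
      rw [e1]
      by_cases hd : c + 1 < n
      · rw [ih r (c+1) (by omega) hr hd (b - (aN:Int)) (b' - (aN:Int)) (by omega) (by omega)]
      · simp only [if_neg hd]

-- ===== VERDICT (by name: the statement is the Claim_ definition above) =====
theorem solve_dfs_spec : Claim_equal_solve_dfs := by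
  intro grid k _ hpre
  obtain ⟨hne, hn0, _⟩ := hpre
  unfold Spec_solve_dfs solve_dfs solve_dfs_alt
  have hm : 0 < grid.length := List.length_pos_iff.mpr hne
  simp only [if_pos hm]
  rw [pv_dfs_eq_D grid grid.length (grid.headD []).length k
      (grid.length + (grid.headD []).length) 0 0 0 (by omega) hm hn0, sub_zero]
  by_cases hk : min k ((grid.length : Int) + ((grid.headD []).length : Int) - 1) < 0
  · rw [if_pos hk]
    have hkneg : k < 0 := by omega
    have hguard : k < pvAd grid 0 0 := by
      rw [pvAd]
      by_cases h : pvG grid 0 0 > 0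
      · rw [if_pos h]; omega
      · rw [if_neg h]; omega
    rw [pvD, if_pos hguard]
    simp
  · rw [if_neg hk]
    have hcap0 : (0:Int) ≤ min k ((grid.length : Int) + ((grid.headD []).length : Int) - 1) := by omega
    rw [pv_rows_eq grid grid.length (grid.headD []).length
        (min k ((grid.length : Int) + ((grid.headD []).length : Int) - 1)).toNat
        grid.length (by omega) le_rfl 0 hn0
        (min k ((grid.length : Int) + ((grid.headD []).length : Int) - 1)).toNat le_rfl]
    rw [show grid.length - grid.length = 0 from by omega]
    rw [Int.toNat_of_nonneg hcap0]
    have hD : pvD grid grid.length (grid.headD []).length 0 0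
        (min k ((grid.length : Int) + ((grid.headD []).length : Int) - 1)) =
        pvD grid grid.length (grid.headD []).length 0 0 k := by
      by_cases hmin : k ≤ (grid.length : Int) + ((grid.headD []).length : Int) - 1
      · rw [min_eq_left hmin]
      · apply pv_D_sat grid grid.length (grid.headD []).length
          (grid.length + (grid.headD []).length) 0 0 (by omega) hm hn0
        · simp only [Nat.sub_zero]
          omega
        · simp only [Nat.sub_zero]
          omega
    rw [hD, show pvB_NEG = pvA_NEG from rfl]
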